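-- pv_equiv track=rewrite | github.com/WangXinyan940/schrodinger-nnp-benchmark | sch_benchmark/tools.py | elem_to_str
-- ===== SOURCE A (Python) =====
-- def elem_to_str(elem):
--     el_sorted = sorted(elem)
--     tmp = {}
--     for e in el_sorted:
--         if e not in tmp:
--             tmp[e] = 0
--         tmp[e] += 1
--     ret = ""
--     for key in tmp:
--         ret += f"{key}{tmp[key]}"
--     return ret
-- ===== SOURCE B (Python) =====
-- def elem_to_str(elem):
--     s = sorted(elem)
--     out = ""
--     i = 0
--     while i < len(s):
--         j = i
--         while j < len(s) and s[j] == s[i]: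
--             j += 1
--         out += s[i] + str(j - i)
--         i = j
--     return out
-- ===== Notes on version B (the rewrite author's own statement) =====
-- stated objective: alternative
-- what changed: Replaces A's maintained count dictionary plus separate output loop with a single two-pointer run-length scan over the sorted list that emits each element-count piece as its run ends; same O(n log n) cost dominated by the sort.
import Mathlib
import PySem

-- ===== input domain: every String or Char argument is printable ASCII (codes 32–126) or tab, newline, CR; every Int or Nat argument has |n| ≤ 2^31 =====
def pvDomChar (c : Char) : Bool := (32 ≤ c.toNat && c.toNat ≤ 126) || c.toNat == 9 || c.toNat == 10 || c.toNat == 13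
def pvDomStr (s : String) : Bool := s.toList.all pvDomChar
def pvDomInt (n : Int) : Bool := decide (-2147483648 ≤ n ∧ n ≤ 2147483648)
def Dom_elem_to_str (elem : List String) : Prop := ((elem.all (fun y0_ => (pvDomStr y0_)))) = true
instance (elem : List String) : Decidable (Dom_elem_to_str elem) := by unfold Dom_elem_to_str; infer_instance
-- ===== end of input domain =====

-- B replaces A's count dictionary + second output loop by one two-pointer run-length scan of the sorted list (objective: alternative, same cost).

-- ===== PORT A =====
def elem_to_str (elem : List String) : String :=
  let el_sorted := PySem.List.sorted elem (fun x => x) false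
  let tmp : PySem.Dict String Int := el_sorted.foldl
    (fun d e =>
      let d := if d.contains e then d else d.insert e 0
      d.insert e (d.getD e 0 + 1))
    PySem.Dict.empty
  tmp.items.foldl (fun ret p => ret ++ p.1 ++ PySem.Int.toStr p.2) ""

-- ===== PORT B =====
-- Source B's outer while loop over index i, rendered as recursion on the remaining suffix s[i:];
-- the inner 'while s[j] == s[i]' run scan is the takeWhile length, 'i = j' the dropWhile
def elem_to_str_alt_go (s : List String) (out : String) : String :=
  match s with
  | [] => out
  | x :: xs =>
      elem_to_str_alt_go (xs.dropWhile (fun y => y == x))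
        (out ++ x ++ PySem.Int.toStr ((xs.takeWhile (fun y => y == x)).length + 1))
termination_by s.length
decreasing_by
  simpa using Nat.lt_succ_of_le (List.Sublist.length_le (List.dropWhile_sublist _))

def elem_to_str_alt (elem : List String) : String :=
  elem_to_str_alt_go (PySem.List.sorted elem (fun x => x) false) ""

-- ===== PRECONDITION & SPEC =====
def Spec_elem_to_str (elem : List String) (out : String) : Prop := out = elem_to_str_alt elem
instance (elem : List String) (out : String) : Decidable (Spec_elem_to_str elem out) := by unfold Spec_elem_to_str; infer_instance

-- ===== CLAIM (what is proved, stated in full; the proofs are below) =====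
def Claim_equal_elem_to_str : Prop := ∀ (elem : List String), Dom_elem_to_str elem → Spec_elem_to_str elem (elem_to_str elem)

-- ===== LEMMAS AND PROOFS =====

-- A's dict-building loop is the Counter loop
theorem foldA_eq_counter (l : List String) :
    l.foldl (fun d e =>
      let d := if d.contains e then d else d.insert e (0 : Int)
      d.insert e (d.getD e 0 + 1)) PySem.Dict.empty = PySem.Dict.counter l := by
  have hstep : (fun (d : PySem.Dict String Int) e =>
      let d := if d.contains e then d else d.insert e (0 : Int)
      d.insert e (d.getD e 0 + 1)) = (fun d e => d.insert e (d.getD e 0 + 1)) := by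
    funext d e
    show (if d.contains e = true then d else d.insert e 0).insert e
        ((if d.contains e = true then d else d.insert e 0).getD e 0 + 1) =
        d.insert e (d.getD e 0 + 1)
    by_cases h : d.contains e = true
    · rw [if_pos h]
    · have hget : d.getD e 0 = 0 := by
        have := (PySem.Dict.get?_eq_none_iff_contains d e).2 (by simpa using h)
        simp [PySem.Dict.getD, this]
      rw [if_neg h, PySem.Dict.insert_insert_self, PySem.Dict.getD_insert_self, hget]
  rw [hstep, PySem.Dict.foldl_insert_getD_add_one_eq_counter]

theorem discard_not_mem {l : List String} {x : String} (h : x ∉ l) :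
    (PySem.Set.ofList l).discard x = PySem.Set.ofList l := by
  apply List.filter_eq_self.2
  intro y hy
  have : y ∈ l := (PySem.Set.mem_ofList l y).1 hy
  simp only [Bool.not_eq_true', beq_eq_false_iff_ne, ne_eq]
  rintro rfl; exact h this

theorem ofList_run (x : String) (t d : List String)
    (ht : ∀ y ∈ t, y = x) (hd : x ∉ d) :
    PySem.Set.ofList (x :: (t ++ d)) = x :: PySem.Set.ofList d := by
  induction t with
  | nil => rw [List.nil_append, PySem.Set.ofList_cons, discard_not_mem hd]
  | cons y ys ih =>
      have hy : y = x := ht y (by simp)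
      subst hy
      have h1 : PySem.Set.ofList (y :: (ys ++ d)) = y :: PySem.Set.ofList d :=
        ih (fun z hz => ht z (by simp [hz]))
      rw [List.cons_append, PySem.Set.ofList_cons, PySem.Set.ofList_cons]
      rw [PySem.Set.ofList_cons] at h1
      rw [h1]
      simp only [PySem.Set.discard, List.filter_cons, beq_self_eq_true, Bool.not_true,
        if_neg (by simp : ¬(false = true))]
      exact congrArg (y :: ·) (discard_not_mem hd)

-- x never occurs after its run in a sorted list
theorem not_mem_dropWhile (x : String) (xs : List String)
    (h : (x :: xs).Pairwise (· ≤ ·)) : x ∉ xs.dropWhile (fun y => y == x) := by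
  induction xs with
  | nil => simp
  | cons y ys ih =>
      rcases List.pairwise_cons.1 h with ⟨hx, hyys⟩
      by_cases hxy : (y == x) = true
      · have hyx : y = x := by simpa using hxy
        subst hyx
        rw [List.dropWhile_cons, if_pos hxy]
        exact ih hyys
      · rw [List.dropWhile_cons, if_neg hxy]
        intro hmem
        rcases List.mem_cons.1 hmem with h1 | h1
        · exact hxy (by simp [h1])
        · have h2 : y ≤ x := (List.pairwise_cons.1 hyys).1 x h1
          have h3 : x ≤ y := hx y (by simp)
          exact hxy (by simp [le_antisymm h2 h3])

-- main bridge: the run-length scan equals A's output fold over the counter items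
theorem go_eq (l : List String) (hs : l.Pairwise (· ≤ ·)) (out : String) :
    elem_to_str_alt_go l out =
      ((PySem.Set.ofList l).map (fun k => (k, (l.count k : Int)))).foldl
        (fun ret p => ret ++ p.1 ++ PySem.Int.toStr p.2) out := by
  match l with
  | [] => simp [elem_to_str_alt_go, PySem.Set.ofList, PySem.Set.empty]
  | x :: xs =>
    set t := xs.takeWhile (fun y => y == x) with hT
    set d := xs.dropWhile (fun y => y == x) with hD
    have hsplit : xs = t ++ d := (List.takeWhile_append_dropWhile).symm
    have ht : ∀ y ∈ t, y = x := by
      intro y hy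
      have := List.mem_takeWhile_imp hy
      simpa using this
    have hxd : x ∉ d := not_mem_dropWhile x xs hs
    have hdPW : d.Pairwise (· ≤ ·) :=
      List.Pairwise.sublist ((List.dropWhile_sublist _).trans (List.sublist_cons_self x xs)) hs
    have hcx : (x :: xs).count x = t.length + 1 := by
      have hxd0 : d.count x = 0 := List.count_eq_zero.2 hxd
      have hct : t.count x = t.length := by
        apply List.count_eq_length.2
        intro y hy; simp [ht y hy]
      rw [hsplit, List.count_cons, List.count_append, hxd0, hct]
      simp
    have hck : ∀ k ∈ PySem.Set.ofList d, (x :: xs).count k = d.count k := by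
      intro k hk
      have hkd : k ∈ d := (PySem.Set.mem_ofList d k).1 hk
      have hkx : k ≠ x := fun h => hxd (h ▸ hkd)
      have hct : t.count k = 0 := by
        apply List.count_eq_zero.2
        intro hkt; exact hkx (ht k hkt)
      rw [hsplit, List.count_cons, List.count_append, hct]
      simp [hkx.symm]
    rw [elem_to_str_alt_go]
    rw [go_eq d hdPW, hsplit, ofList_run x t d ht hxd, List.map_cons, List.foldl_cons]
    rw [← hsplit, hcx]
    have hmap : (PySem.Set.ofList d).map (fun k => (k, ((x :: xs).count k : Int))) =
        (PySem.Set.ofList d).map (fun k => (k, (d.count k : Int))) :=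
      List.map_congr_left (fun k hk => by rw [hck k hk])
    rw [hmap]
    push_cast
    rfl
termination_by l.length
decreasing_by
  simpa using Nat.lt_succ_of_le (List.Sublist.length_le (List.dropWhile_sublist _))

-- ===== VERDICT (by name: the statement is the Claim_ definition above) =====
theorem elem_to_str_spec : Claim_equal_elem_to_str := by
  intro elem _
  unfold Spec_elem_to_str elem_to_str elem_to_str_alt
  show (List.foldl (fun ret p => ret ++ p.1 ++ PySem.Int.toStr p.2) ""
      ((List.foldl (fun d e =>
        let d := if d.contains e then d else d.insert e (0 : Int)
        d.insert e (d.getD e 0 + 1)) PySem.Dict.empty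
        (PySem.List.sorted elem (fun x => x) false)).items)) = _
  rw [foldA_eq_counter, PySem.Dict.items_counter]
  exact (go_eq _ (by simpa using PySem.List.sorted_pairwise elem (fun x => x)) "").symm
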